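-- pv_equiv track=rewrite | github.com/bica-tools/reticulate | reticulate/ect_fingerprint.py | _face_vector_of_subset
-- ===== SOURCE A (Python) =====
-- def _chains_in_subset(
--     subset: list[int],
--     reach: dict[int, set[int]],
--     scc_map: dict[int, int],
-- ) -> list[list[int]]:
--     """Enumerate all non-empty chains (totally ordered subsets) in subset.
--
--     A chain is a list [x_0, x_1, ..., x_k] with x_0 > x_1 > ... > x_k in
--     the partial order (strict, SCC-quotient).
--     """
--     sub = set(subset)
--
--     def strictly_above(a: int, b: int) -> bool:
--         # a > b iff b reachable from a and they are in different SCCs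
--         return a != b and b in reach[a] and scc_map[a] != scc_map[b]
--
--     chains: list[list[int]] = []
--
--     def extend(prefix: list[int]) -> None:
--         chains.append(list(prefix))
--         last = prefix[-1]
--         for y in subset:
--             if y in sub and strictly_above(last, y):
--                 prefix.append(y)
--                 extend(prefix)
--                 prefix.pop()
--
--     for x in subset:
--         extend([x])
--     return chains
--
-- def _face_vector_of_subset(
--     subset: list[int],
--     reach: dict[int, set[int]],
--     scc_map: dict[int, int],
-- ) -> list[int]:
--     """Face vector of the order complex of the induced sub-poset.
--
--     f_k = number of chains of length k+1 (i.e., k-simplices).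
--     """
--     chains = _chains_in_subset(subset, reach, scc_map)
--     if not chains:
--         return []
--     max_len = max(len(c) for c in chains)
--     fv = [0] * max_len
--     for c in chains:
--         fv[len(c) - 1] += 1
--     return fv
-- ===== SOURCE B (Python) =====
-- def _face_vector_of_subset(subset, reach, scc_map):
--     """Layered DP: g holds (element, number-of-chains-of-current-length starting there);
--     one counting step per chain length instead of enumerating every chain individually."""
--     def above(a, b):
--         return a != b and b in reach[a] and scc_map[a] != scc_map[b]
--     g = [(x, 1) for x in subset]
--     fv = []
--     while any(c for _, c in g):
--         fv.append(sum(c for _, c in g))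
--         g = [(x, sum(c for y, c in g if above(x, y))) for x, _ in g]
--     return fv
-- ===== Notes on version B (the rewrite author's own statement) =====
-- stated objective: alternative
-- what changed: B replaces A's recursive enumeration of every individual chain by a layered dynamic program: it keeps, for each element, the number of chains of the current length starting there, advances all counts one length per loop iteration, and emits one face-vector entry per layer.
import Mathlib
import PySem

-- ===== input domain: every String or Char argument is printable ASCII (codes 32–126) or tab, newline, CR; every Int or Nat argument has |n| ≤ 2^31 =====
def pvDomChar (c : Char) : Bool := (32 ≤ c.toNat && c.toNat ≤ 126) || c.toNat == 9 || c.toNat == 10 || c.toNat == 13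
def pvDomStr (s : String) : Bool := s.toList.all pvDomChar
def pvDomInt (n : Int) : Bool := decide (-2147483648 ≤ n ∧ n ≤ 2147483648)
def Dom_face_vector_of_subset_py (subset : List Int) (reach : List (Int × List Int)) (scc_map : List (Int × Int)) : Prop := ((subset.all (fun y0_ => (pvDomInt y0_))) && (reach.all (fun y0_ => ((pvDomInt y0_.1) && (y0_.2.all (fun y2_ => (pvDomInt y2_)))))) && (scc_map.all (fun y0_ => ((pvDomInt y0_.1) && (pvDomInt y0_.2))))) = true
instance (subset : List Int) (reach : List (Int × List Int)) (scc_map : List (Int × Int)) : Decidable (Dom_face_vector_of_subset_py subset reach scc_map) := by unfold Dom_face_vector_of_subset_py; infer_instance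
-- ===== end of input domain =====

-- B counts chains per length with a layered DP (one counting step per chain length)
-- instead of enumerating every chain individually; the equivalence is about the return
-- value on inputs where the Python A terminates (keys present, relation acyclic).

-- ===== PORT A =====
-- strictly_above(a, b): a != b and b in reach[a] and scc_map[a] != scc_map[b]
def pvAboveA (reach : List (Int × List Int)) (scc_map : List (Int × Int)) (a b : Int) : Bool :=
  (a != b) && ((PySem.Dict.mk reach).getD a []).contains b &&
    ((PySem.Dict.mk scc_map).getD a (0 : Int) != (PySem.Dict.mk scc_map).getD b (0 : Int))

-- extend(prefix): append prefix, then recurse on prefix+[y] for each admissible y.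
-- fuel bounds the recursion depth; on every input where the Python returns, chains
-- have pairwise-distinct values, so fuel = len(subset) is never exhausted.
def pvExtendA (subset : List Int) (reach : List (Int × List Int)) (scc_map : List (Int × Int)) :
    Nat → List Int → List (List Int)
  | 0, pfx => [pfx]
  | fuel + 1, pfx =>
      pfx :: subset.flatMap (fun y =>
        if PySem.Set.contains (PySem.Set.ofList subset) y
             && pvAboveA reach scc_map (pfx.getLastD 0) y then
          pvExtendA subset reach scc_map fuel (pfx ++ [y])
        else [])

def face_vector_of_subset_py (subset : List Int) (reach : List (Int × List Int)) (scc_map : List (Int × Int)) : List Int :=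
  let chains := subset.flatMap (fun x => pvExtendA subset reach scc_map subset.length [x])
  if chains.isEmpty then []
  else
    let maxLen := ((chains.map List.length).max?).getD 0
    -- fv[len(c) - 1] += 1 ; the index len(c)-1 is a Nat since every chain is nonempty
    chains.foldl (fun fv c => fv.set (c.length - 1) (fv.getD (c.length - 1) 0 + 1))
      (List.replicate maxLen (0 : Int))

-- ===== PORT B =====
def pvAboveB (reach : List (Int × List Int)) (scc_map : List (Int × Int)) (a b : Int) : Bool :=
  (a != b) && ((PySem.Dict.mk reach).getD a []).contains b &&
    ((PySem.Dict.mk scc_map).getD a (0 : Int) != (PySem.Dict.mk scc_map).getD b (0 : Int))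

-- g = [(x, sum(c for y, c in g if above(x, y))) for x, _ in g]
def pvStepB (reach : List (Int × List Int)) (scc_map : List (Int × Int))
    (g : List (Int × Int)) : List (Int × Int) :=
  g.map (fun p => (p.1, ((g.filter (fun q => pvAboveB reach scc_map p.1 q.1)).map Prod.snd).sum))

-- while any(c for _, c in g): … ; fuel = len(subset)+1 iterations suffice on every
-- input where the Python loop terminates (the counts vanish after ≤ len(subset) layers).
def pvLoopB (reach : List (Int × List Int)) (scc_map : List (Int × Int)) :
    Nat → List (Int × Int) → List Int → List Int
  | 0, _, fv => fv
  | fuel + 1, g, fv =>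
      if g.any (fun p => p.2 != 0) then
        pvLoopB reach scc_map fuel (pvStepB reach scc_map g) (fv ++ [(g.map Prod.snd).sum])
      else fv

def face_vector_of_subset_py_alt (subset : List Int) (reach : List (Int × List Int)) (scc_map : List (Int × Int)) : List Int :=
  pvLoopB reach scc_map (subset.length + 1) (subset.map (fun x => (x, (1 : Int)))) []

-- ===== PRECONDITION & SPEC =====
-- helpers for Pre_: the strict-above relation and a bounded reflexive-transitive closure
def pvAboveP (reach : List (Int × List Int)) (scc_map : List (Int × Int)) (a b : Int) : Bool :=
  (a != b) && ((PySem.Dict.mk reach).getD a []).contains b &&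
    ((PySem.Dict.mk scc_map).getD a (0 : Int) != (PySem.Dict.mk scc_map).getD b (0 : Int))

def pvCloseP (subset : List Int) (reach : List (Int × List Int)) (scc_map : List (Int × Int)) :
    Nat → List Int → List Int
  | 0, S => S
  | n + 1, S =>
      pvCloseP subset reach scc_map n
        (S ++ subset.filter (fun y =>
          (S.any (fun x => pvAboveP reach scc_map x y)) && !S.contains y))

-- Pre_: exactly the inputs on which the Python A returns — every dict key it looks up
-- is present (no KeyError) and the strictly-above relation of the INPUT has no cycle
-- inside subset (no a reaches itself; otherwise A's recursion never terminates, and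
-- B's while loop never terminates either). pvCloseP computes the transitive closure of
-- that input relation (a property of the input data, not of either algorithm).
def Pre_face_vector_of_subset_py (subset : List Int) (reach : List (Int × List Int)) (scc_map : List (Int × Int)) : Prop :=
  (∀ a ∈ subset, (∃ b ∈ subset, b ≠ a) → ((PySem.Dict.mk reach).get? a).isSome = true) ∧
  (∀ a ∈ subset, ∀ b ∈ subset, a ≠ b → b ∈ (PySem.Dict.mk reach).getD a [] →
      ((PySem.Dict.mk scc_map).get? a).isSome = true ∧ ((PySem.Dict.mk scc_map).get? b).isSome = true) ∧
  (∀ a ∈ subset, a ∉ pvCloseP subset reach scc_map subset.length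
      (subset.filter (fun y => pvAboveP reach scc_map a y)))

instance (subset : List Int) (reach : List (Int × List Int)) (scc_map : List (Int × Int)) : Decidable (Pre_face_vector_of_subset_py subset reach scc_map) := by unfold Pre_face_vector_of_subset_py; infer_instance

def pvWitness_face_vector_of_subset_py : List Int × (List (Int × List Int)) × (List (Int × Int)) :=
  ([1, 2], [(1, [2]), (2, [])], [(1, 0), (2, 1)])

def Spec_face_vector_of_subset_py (subset : List Int) (reach : List (Int × List Int)) (scc_map : List (Int × Int)) (out : List Int) : Prop := out = face_vector_of_subset_py_alt subset reach scc_map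
instance (subset : List Int) (reach : List (Int × List Int)) (scc_map : List (Int × Int)) (out : List Int) : Decidable (Spec_face_vector_of_subset_py subset reach scc_map out) := by unfold Spec_face_vector_of_subset_py; infer_instance

-- ===== CLAIM (what is proved, stated in full; the proofs are below) =====
-- (the two fuelled ports in fact agree on every input, so the proof below does not
-- need to consume Pre_; Pre_ delimits where the Python A itself returns a value)
def Claim_equal_face_vector_of_subset_py : Prop := ∀ (subset : List Int) (reach : List (Int × List Int)) (scc_map : List (Int × Int)), Dom_face_vector_of_subset_py subset reach scc_map → Pre_face_vector_of_subset_py subset reach scc_map → Spec_face_vector_of_subset_py subset reach scc_map (face_vector_of_subset_py subset reach scc_map)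

-- ===== LEMMAS AND PROOFS =====

-- number of chains with d extensions below a given last element (the ideal count)
def pvCC (subset : List Int) (reach : List (Int × List Int)) (scc_map : List (Int × Int)) :
    Nat → Int → Int
  | 0, _ => 1
  | d + 1, a =>
      ((subset.filter (fun y => pvAboveA reach scc_map a y)).map
        (pvCC subset reach scc_map d)).sum

def pvS (subset : List Int) (reach : List (Int × List Int)) (scc_map : List (Int × Int))
    (d : Nat) : Int :=
  (subset.map (pvCC subset reach scc_map d)).sum

theorem pv_countP_flatMap {α β : Type} (l : List α) (f : α → List β) (p : β → Bool) :
    (l.flatMap f).countP p = (l.map fun a => (f a).countP p).sum := by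
  induction l with
  | nil => simp
  | cons a l ih => simp [List.countP_append, ih]

theorem pv_sum_if_filter {α : Type} (l : List α) (p : α → Bool) (f : α → Int) :
    (l.map fun a => if p a then f a else 0).sum = ((l.filter p).map f).sum := by
  induction l with
  | nil => simp
  | cons a l ih =>
    by_cases h : p a <;> simp [h, ih]

theorem pv_all_zero_of_sum_zero (l : List Int) (h : ∀ x ∈ l, 0 ≤ x) (hs : l.sum = 0) :
    ∀ x ∈ l, x = 0 := by
  induction l with
  | nil => simp
  | cons a l ih =>
    have ha : 0 ≤ a := h a (by simp)
    have hl : 0 ≤ l.sum := List.sum_nonneg (fun x hx => h x (by simp [hx]))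
    have hsum : a + l.sum = 0 := by simpa using hs
    intro x hx
    rcases List.mem_cons.mp hx with rfl | hx
    · omega
    · exact ih (fun y hy => h y (by simp [hy])) (by omega) x hx

theorem pvCC_nonneg (subset : List Int) (reach : List (Int × List Int)) (scc_map : List (Int × Int)) :
    ∀ d a, 0 ≤ pvCC subset reach scc_map d a := by
  intro d
  induction d with
  | zero => intro a; simp [pvCC]
  | succ d ih =>
    intro a
    simp only [pvCC]
    exact List.sum_nonneg (by
      intro x hx
      rcases List.mem_map.mp hx with ⟨y, _, rfl⟩
      exact ih y)

theorem pvS_zero_succ (subset : List Int) (reach : List (Int × List Int)) (scc_map : List (Int × Int))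
    (d : Nat) (h : pvS subset reach scc_map d = 0) : pvS subset reach scc_map (d + 1) = 0 := by
  have hall : ∀ x ∈ subset, pvCC subset reach scc_map d x = 0 := by
    intro x hx
    have := pv_all_zero_of_sum_zero (subset.map (pvCC subset reach scc_map d))
      (by intro z hz; rcases List.mem_map.mp hz with ⟨y, _, rfl⟩; exact pvCC_nonneg _ _ _ _ _) h
    exact this _ (List.mem_map.mpr ⟨x, hx, rfl⟩)
  unfold pvS
  apply List.sum_eq_zero
  intro z hz
  rcases List.mem_map.mp hz with ⟨x, hx, rfl⟩
  simp only [pvCC]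
  apply List.sum_eq_zero
  intro w hw
  rcases List.mem_map.mp hw with ⟨y, hy, rfl⟩
  exact hall y (List.mem_of_mem_filter hy)

theorem pvS_zero_mono (subset : List Int) (reach : List (Int × List Int)) (scc_map : List (Int × Int))
    (d : Nat) (h : pvS subset reach scc_map d = 0) :
    ∀ e, d ≤ e → pvS subset reach scc_map e = 0 := by
  intro e
  induction e with
  | zero => intro he; simpa [Nat.le_zero.mp he] using h
  | succ e ih =>
    intro he
    rcases Nat.lt_or_ge d (e + 1) with hlt | hge
    · exact pvS_zero_succ _ _ _ _ (ih (by omega))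
    · have : d = e + 1 := by omega
      simpa [this] using h

-- every element of extend(pfx) extends pfx in length, bounded by the fuel
theorem pvExtendA_len_ge (subset : List Int) (reach : List (Int × List Int)) (scc_map : List (Int × Int)) :
    ∀ F pfx c, c ∈ pvExtendA subset reach scc_map F pfx → pfx.length ≤ c.length := by
  intro F
  induction F with
  | zero => intro pfx c hc; simp [pvExtendA] at hc; simp [hc]
  | succ F ih =>
    intro pfx c hc
    simp only [pvExtendA, List.mem_cons] at hc
    rcases hc with rfl | hc
    · exact le_refl _
    · rcases List.mem_flatMap.mp hc with ⟨y, _, hy⟩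
      split at hy
      · have := ih (pfx ++ [y]) c hy
        simpa using Nat.le_of_succ_le (by simpa [Nat.succ_eq_add_one] using this)
      · simp at hy

theorem pvExtendA_len_le (subset : List Int) (reach : List (Int × List Int)) (scc_map : List (Int × Int)) :
    ∀ F pfx c, c ∈ pvExtendA subset reach scc_map F pfx → c.length ≤ pfx.length + F := by
  intro F
  induction F with
  | zero => intro pfx c hc; simp [pvExtendA] at hc; simp [hc]
  | succ F ih =>
    intro pfx c hc
    simp only [pvExtendA, List.mem_cons] at hc
    rcases hc with rfl | hc
    · omega
    · rcases List.mem_flatMap.mp hc with ⟨y, _, hy⟩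
      split at hy
      · have := ih (pfx ++ [y]) c hy
        simp at this; omega
      · simp at hy

theorem pvExtendA_self_mem (subset : List Int) (reach : List (Int × List Int)) (scc_map : List (Int × Int)) :
    ∀ F pfx, pfx ∈ pvExtendA subset reach scc_map F pfx := by
  intro F pfx
  cases F <;> simp [pvExtendA]

-- the counting lemma: chains with d extensions are counted by pvCC, up to the fuel
theorem pvExtendA_count (subset : List Int) (reach : List (Int × List Int)) (scc_map : List (Int × Int)) :
    ∀ F d pfx, ((pvExtendA subset reach scc_map F pfx).countP
        (fun c => c.length == d + pfx.length) : Int)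
      = if d ≤ F then pvCC subset reach scc_map d (pfx.getLastD 0) else 0 := by
  intro F
  induction F with
  | zero =>
    intro d pfx
    cases d with
    | zero => simp [pvExtendA, pvCC]
    | succ d =>
      have h : (pfx.length == d + 1 + pfx.length) = false := by
        simp only [beq_eq_false_iff_ne]; omega
      simp [pvExtendA, h]
  | succ F ih =>
    intro d pfx
    simp only [pvExtendA, List.countP_cons, pv_countP_flatMap]
    cases d with
    | zero =>
      have hz : ∀ y ∈ subset,
          ((if PySem.Set.contains (PySem.Set.ofList subset) y
                && pvAboveA reach scc_map (pfx.getLastD 0) y then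
              pvExtendA subset reach scc_map F (pfx ++ [y])
            else []).countP (fun c => c.length == 0 + pfx.length)) = 0 := by
        intro y hy
        split
        · rw [List.countP_eq_zero]
          intro c hc
          have := pvExtendA_len_ge subset reach scc_map F (pfx ++ [y]) c hc
          simp only [List.length_append, List.length_cons, List.length_nil] at this
          simp only [beq_iff_eq]
          omega
        · simp
      rw [List.map_congr_left hz]
      simp [pvCC]
    | succ d =>
      have hpfx : ((pfx.length == d + 1 + pfx.length) : Bool) = false := by
        simp only [beq_eq_false_iff_ne]; omega
      rw [hpfx]
      have hcast : (((subset.map (fun y =>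
          (if PySem.Set.contains (PySem.Set.ofList subset) y
                && pvAboveA reach scc_map (pfx.getLastD 0) y then
              pvExtendA subset reach scc_map F (pfx ++ [y])
            else []).countP (fun c => c.length == d + 1 + pfx.length))).sum : Nat) : Int)
          = (subset.map (fun y => ((
          (if PySem.Set.contains (PySem.Set.ofList subset) y
                && pvAboveA reach scc_map (pfx.getLastD 0) y then
              pvExtendA subset reach scc_map F (pfx ++ [y])
            else []).countP (fun c => c.length == d + 1 + pfx.length) : Nat) : Int))).sum := by
        rw [Nat.cast_list_sum, List.map_map]; rfl
      simp only [Bool.false_eq_true, if_false, Nat.add_zero, hcast]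
      have hy : ∀ y ∈ subset,
          (((if PySem.Set.contains (PySem.Set.ofList subset) y
                && pvAboveA reach scc_map (pfx.getLastD 0) y then
              pvExtendA subset reach scc_map F (pfx ++ [y])
            else []).countP (fun c => c.length == d + 1 + pfx.length) : Nat) : Int)
          = if pvAboveA reach scc_map (pfx.getLastD 0) y then
              (if d ≤ F then pvCC subset reach scc_map d y else 0) else 0 := by
        intro y hymem
        have hmem : PySem.Set.contains (PySem.Set.ofList subset) y = true := by
          rw [PySem.Set.contains_iff]; exact (PySem.Set.mem_ofList _ _).mpr hymem
        rw [hmem]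
        by_cases hab : pvAboveA reach scc_map (pfx.getLastD 0) y = true
        · have hpred : (fun (c : List Int) => c.length == d + 1 + pfx.length)
              = (fun (c : List Int) => c.length == d + (pfx ++ [y]).length) := by
            funext c
            simp only [List.length_append, List.length_cons, List.length_nil]
            congr 1
            omega
          simp only [hab, Bool.true_and, if_true]
          rw [hpred, ih d (pfx ++ [y])]
          simp
        · simp only [Bool.true_and]
          rw [if_neg hab, if_neg hab]
          simp
      rw [List.map_congr_left hy]
      by_cases hd : d ≤ F
      · have hd2 : d + 1 ≤ F + 1 := by omega
        simp only [hd, if_true, hd2, if_true]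
        rw [pv_sum_if_filter]
        simp [pvCC]
      · have hd2 : ¬ (d + 1 ≤ F + 1) := by omega
        rw [if_neg hd2]
        apply List.sum_eq_zero
        intro z hz
        rcases List.mem_map.mp hz with ⟨y, hy2, rfl⟩
        simp [hd]

-- the step of B advances the ideal counts by one layer
theorem pvStepB_map (subset : List Int) (reach : List (Int × List Int)) (scc_map : List (Int × Int)) (d : Nat) :
    pvStepB reach scc_map (subset.map (fun x => (x, pvCC subset reach scc_map d x)))
      = subset.map (fun x => (x, pvCC subset reach scc_map (d + 1) x)) := by
  unfold pvStepB
  rw [List.map_map]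
  refine List.map_congr_left (fun x _ => ?_)
  simp only [Function.comp_def]
  congr 1
  rw [List.filter_map, List.map_map]
  simp [pvCC, pvAboveB, pvAboveA, Function.comp_def]

-- the loop of B emits pvS L, pvS (L+1), … until the counts vanish
theorem pvLoopB_run (subset : List Int) (reach : List (Int × List Int)) (scc_map : List (Int × Int)) (m : Nat)
    (hm1 : ∀ d, d < m → pvS subset reach scc_map d ≠ 0)
    (hm2 : m ≤ subset.length → pvS subset reach scc_map m = 0) :
    ∀ fuel L acc, L + fuel = subset.length + 1 → L ≤ m → m ≤ subset.length + 1 →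
      pvLoopB reach scc_map fuel (subset.map (fun x => (x, pvCC subset reach scc_map L x))) acc
        = acc ++ (List.range (m - L)).map (fun i => pvS subset reach scc_map (L + i)) := by
  intro fuel
  induction fuel with
  | zero =>
    intro L acc hLf hLm hmn
    have : L = m := by omega
    simp [pvLoopB, this]
  | succ fuel ih =>
    intro L acc hLf hLm hmn
    by_cases hL : L < m
    · have hSL : pvS subset reach scc_map L ≠ 0 := hm1 L hL
      have hex : ∃ x ∈ subset, pvCC subset reach scc_map L x ≠ 0 := by
        by_contra h
        push Not at h
        exact hSL (List.sum_eq_zero (fun z hz => by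
          rcases List.mem_map.mp hz with ⟨x, hx, rfl⟩; exact h x hx))
      rcases hex with ⟨x, hx, hne⟩
      have hany : (subset.map (fun x => (x, pvCC subset reach scc_map L x))).any
          (fun p => p.2 != 0) = true := by
        refine List.any_eq_true.mpr ⟨(x, pvCC subset reach scc_map L x),
          List.mem_map.mpr ⟨x, hx, rfl⟩, ?_⟩
        simpa using hne
      simp only [pvLoopB]
      rw [if_pos hany, pvStepB_map]
      have hsum : ((subset.map (fun x => (x, pvCC subset reach scc_map L x))).map Prod.snd).sum
          = pvS subset reach scc_map L := by
        rw [List.map_map]; rfl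
      rw [hsum, ih (L + 1) (acc ++ [pvS subset reach scc_map L]) (by omega) (by omega) hmn]
      rw [List.append_assoc]
      congr 1
      have hmL : m - L = (m - (L + 1)) + 1 := by omega
      rw [hmL, List.range_succ_eq_map]
      simp only [List.map_cons, List.map_map, Nat.add_zero, List.singleton_append]
      congr 1
      refine List.map_congr_left (fun i _ => ?_)
      simp only [Function.comp_def]
      congr 1
      omega
    · have hLeq : L = m := by omega
      subst hLeq
      have hS0 : pvS subset reach scc_map L = 0 := hm2 (by omega)
      have hall : ∀ x ∈ subset, pvCC subset reach scc_map L x = 0 := by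
        intro x hx
        refine pv_all_zero_of_sum_zero _ ?_ hS0 _ (List.mem_map.mpr ⟨x, hx, rfl⟩)
        intro z hz
        rcases List.mem_map.mp hz with ⟨y, _, rfl⟩
        exact pvCC_nonneg _ _ _ _ _
      have hany : (subset.map (fun x => (x, pvCC subset reach scc_map L x))).any
          (fun p => p.2 != 0) = false := by
        rw [List.any_eq_false]
        intro p hp
        rcases List.mem_map.mp hp with ⟨y, hy, rfl⟩
        simpa using hall y hy
      simp only [pvLoopB]
      rw [if_neg (by simp [hany])]
      simp

-- folding the bucket increments over the chains counts chains by length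
theorem pv_fold_bump (chains : List (List Int)) :
    ∀ (init : List Int) (m : Nat), init.length = m →
      (∀ c ∈ chains, 1 ≤ c.length ∧ c.length ≤ m) →
      chains.foldl (fun fv c => fv.set (c.length - 1) (fv.getD (c.length - 1) 0 + 1)) init
        = (List.range m).map (fun k => init.getD k 0 + (chains.countP (fun c => c.length == k + 1) : Int)) := by
  induction chains with
  | nil =>
    intro init m hlen hc
    simp only [List.foldl_nil, List.countP_nil, Nat.cast_zero, add_zero]
    apply List.ext_getElem
    · simp [hlen]
    · intro k h1 h2
      have hk : k < m := by simpa using h2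
      have hk2 : k < init.length := by omega
      simp [List.getD, List.getElem?_eq_getElem hk2]
  | cons c rest ih =>
    intro init m hlen hc
    have hc1 := (hc c (by simp)).1
    have hc2 := (hc c (by simp)).2
    simp only [List.foldl_cons]
    rw [ih (init.set (c.length - 1) (init.getD (c.length - 1) 0 + 1)) m (by simp [hlen])
        (fun d hd => hc d (by simp [hd]))]
    refine List.map_congr_left (fun k hk => ?_)
    have hkm : k < m := List.mem_range.mp hk
    have hset : (init.set (c.length - 1) (init.getD (c.length - 1) 0 + 1)).getD k 0
        = if c.length - 1 = k then init.getD (c.length - 1) 0 + 1 else init.getD k 0 := by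
      rw [List.getD_eq_getElem _ _ (by simpa using (by omega : k < init.length))]
      rw [List.getElem_set]
      split
      · rfl
      · exact (List.getD_eq_getElem _ _ (by omega)).symm
    rw [hset, List.countP_cons]
    by_cases hke : c.length - 1 = k
    · have hb : (c.length == k + 1) = true := by
        simp only [beq_iff_eq]; omega
      subst hke
      rw [if_pos rfl, hb]
      push_cast
      simp only [if_pos trivial]
      ring
    · have hb : (c.length == k + 1) = false := by
        simp only [beq_eq_false_iff_ne]; omega
      rw [if_neg hke, hb]
      push_cast
      omega

-- ===== VERDICT (by name: the statement is the Claim_ definition above) =====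
theorem face_vector_of_subset_py_spec : Claim_equal_face_vector_of_subset_py := by
  intro subset reach scc_map _ _
  unfold Spec_face_vector_of_subset_py
  by_cases hs : subset = []
  · subst hs
    simp [face_vector_of_subset_py, face_vector_of_subset_py_alt, pvLoopB]
  · -- notation
    have hx0 : ∃ x, x ∈ subset := by
      cases subset with
      | nil => exact absurd rfl hs
      | cons a l => exact ⟨a, by simp⟩
    rcases hx0 with ⟨x0, hx0⟩
    set n := subset.length with hn
    set C := subset.flatMap (fun x => pvExtendA subset reach scc_map n [x]) with hC
    have hmemC : [x0] ∈ C := by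
      rw [hC]
      exact List.mem_flatMap.mpr ⟨x0, hx0, pvExtendA_self_mem _ _ _ _ _⟩
    have hCne : C ≠ [] := fun h => by simp [h] at hmemC
    have hlb : ∀ c ∈ C, 1 ≤ c.length := by
      intro c hc
      rcases List.mem_flatMap.mp hc with ⟨x, _, hcx⟩
      simpa using pvExtendA_len_ge subset reach scc_map n [x] c hcx
    have hub : ∀ c ∈ C, c.length ≤ n + 1 := by
      intro c hc
      rcases List.mem_flatMap.mp hc with ⟨x, _, hcx⟩
      have := pvExtendA_len_le subset reach scc_map n [x] c hcx
      simpa [Nat.add_comm] using this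
    -- the maximum length
    obtain ⟨m, hmax⟩ : ∃ m, (C.map List.length).max? = some m := by
      cases h : (C.map List.length).max? with
      | none =>
        exact absurd (List.map_eq_nil_iff.mp (List.max?_eq_none_iff.mp h)) hCne
      | some v => exact ⟨v, rfl⟩
    have hmprop := List.max?_eq_some_iff.mp hmax
    have hmmem : m ∈ C.map List.length := hmprop.1
    have hmle : ∀ b ∈ C.map List.length, b ≤ m := hmprop.2
    have hm1le : 1 ≤ m := by
      rcases List.mem_map.mp hmmem with ⟨c, hc, rfl⟩
      exact hlb c hc
    have hmn1 : m ≤ n + 1 := by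
      rcases List.mem_map.mp hmmem with ⟨c, hc, rfl⟩
      exact hub c hc
    have hlenle : ∀ c ∈ C, c.length ≤ m := fun c hc =>
      hmle _ (List.mem_map.mpr ⟨c, hc, rfl⟩)
    -- counting chains of each length
    have hcount : ∀ k : Nat, k ≤ n →
        ((C.countP (fun c => c.length == k + 1) : Nat) : Int) = pvS subset reach scc_map k := by
      intro k hk
      rw [hC, pv_countP_flatMap, Nat.cast_list_sum, List.map_map]
      unfold pvS
      refine congrArg List.sum (List.map_congr_left (fun x hx => ?_))
      simp only [Function.comp_def]
      have := pvExtendA_count subset reach scc_map n k [x]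
      simp only [List.length_cons, List.length_nil, List.getLastD_cons, List.getLastD_nil] at this
      rw [this, if_pos hk]
    -- pvS does not vanish below m, vanishes at m
    have hSm1 : pvS subset reach scc_map (m - 1) ≠ 0 := by
      have hpos : 0 < C.countP (fun c => c.length == m) := by
        rcases List.mem_map.mp hmmem with ⟨c, hc, rfl⟩
        exact List.countP_pos_iff.mpr ⟨c, hc, by simp⟩
      have heq := hcount (m - 1) (by omega)
      have hmm : m - 1 + 1 = m := by omega
      rw [hmm] at heq
      rw [← heq]
      positivity
    have hm1 : ∀ d, d < m → pvS subset reach scc_map d ≠ 0 := by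
      intro d hd hzero
      exact hSm1 (pvS_zero_mono subset reach scc_map d hzero (m - 1) (by omega))
    have hm2 : m ≤ n → pvS subset reach scc_map m = 0 := by
      intro hmn
      have h0 : C.countP (fun c => c.length == m + 1) = 0 := by
        rw [List.countP_eq_zero]
        intro c hc
        have := hlenle c hc
        simp only [beq_iff_eq]
        omega
      have := hcount m hmn
      rw [h0] at this
      simpa using this.symm
    -- evaluate port A
    have hA : face_vector_of_subset_py subset reach scc_map
        = (List.range m).map (fun k => ((C.countP (fun c => c.length == k + 1) : Nat) : Int)) := by
      show (let chains := subset.flatMap (fun x => pvExtendA subset reach scc_map subset.length [x]);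
        if chains.isEmpty then []
        else
          let maxLen := ((chains.map List.length).max?).getD 0
          chains.foldl (fun fv c => fv.set (c.length - 1) (fv.getD (c.length - 1) 0 + 1))
            (List.replicate maxLen (0 : Int))) = _
      simp only [← hn, ← hC]
      rw [if_neg (by simpa [List.isEmpty_iff] using hCne)]
      rw [hmax]
      simp only [Option.getD_some]
      rw [pv_fold_bump C (List.replicate m 0) m (by simp) (fun c hc => ⟨hlb c hc, hlenle c hc⟩)]
      refine List.map_congr_left (fun k hk => ?_)
      have hkm : k < m := List.mem_range.mp hk
      have : (List.replicate m (0 : Int)).getD k 0 = 0 := by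
        simp [List.getD, List.getElem?_eq_getElem (by simpa using hkm : k < (List.replicate m (0 : Int)).length)]
      rw [this, zero_add]
    -- evaluate port B
    have hB : face_vector_of_subset_py_alt subset reach scc_map
        = (List.range m).map (fun i => pvS subset reach scc_map i) := by
      show pvLoopB reach scc_map (subset.length + 1) (subset.map (fun x => (x, (1 : Int)))) []
        = _
      have h1 : subset.map (fun x => (x, (1 : Int)))
          = subset.map (fun x => (x, pvCC subset reach scc_map 0 x)) := by
        refine List.map_congr_left (fun x _ => ?_)
        rfl
      rw [h1, ← hn,
        pvLoopB_run subset reach scc_map m hm1 hm2 (n + 1) 0 [] (by omega) (by omega) hmn1]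
      simp
    rw [hA, hB]
    refine List.map_congr_left (fun k hk => ?_)
    have hkm : k < m := List.mem_range.mp hk
    exact hcount k (by omega)
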